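-- pv_equiv track=rewrite | github.com/Will-Harris00/Countdown | countdown_main.py | word_combinations
-- ===== SOURCE A (Python) =====
-- def word_combinations(letters: str) -> str:
--     """Finds every combination of every length of the available characters"""
--     sorted_word = "".join(sorted(letters))
--     comblist = []
--     from itertools import combinations
--     # starting with the longest letter string count down to zero
--     for i in range(len(sorted_word), 0, -1):
--         # for each length of letter strings generate all possible combinations
--         for substringletterslist in combinations(sorted_word, i):
--             # for each combination of letters convert list to string
--             substringletters = "".join(substringletterslist)
--             comblist.append(substringletters)
--     # substring_letters should then be compared with a sorted_word_list
--     return comblist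
-- ===== SOURCE B (Python) =====
-- def _shift(ch, buckets):
--     # buckets = [B_0, ..., B_m] (combinations grouped by length for the suffix);
--     # returns [grow(B_0)+B_1, grow(B_1)+B_2, ..., grow(B_{m-1})+B_m, grow(B_m)]
--     head, rest = buckets[0], buckets[1:]
--     grown = [[ch] + s for s in head]
--     if not rest:
--         return [grown]
--     return [grown + rest[0]] + _shift(ch, rest)
--
--
-- def word_combinations(letters: str) -> str:
--     """DP over the sorted characters (right to left): bucket k holds all
--     length-k combinations of the suffix processed so far, in itertools order."""
--     sorted_word = sorted(letters)
--     buckets = [[[]]]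
--     for ch in reversed(sorted_word):
--         buckets = [[[]]] + _shift(ch, buckets)
--     out = []
--     for bucket in reversed(buckets[1:]):
--         for s in bucket:
--             out.append("".join(s))
--     return out
-- ===== Notes on version B (the rewrite author's own statement) =====
-- stated objective: alternative
-- what changed: Replaces the per-length itertools.combinations passes with a single right-to-left dynamic program over the sorted characters that maintains all combinations grouped by length (bucket k of the current suffix), then concatenates the buckets longest-first.
import Mathlib
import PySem

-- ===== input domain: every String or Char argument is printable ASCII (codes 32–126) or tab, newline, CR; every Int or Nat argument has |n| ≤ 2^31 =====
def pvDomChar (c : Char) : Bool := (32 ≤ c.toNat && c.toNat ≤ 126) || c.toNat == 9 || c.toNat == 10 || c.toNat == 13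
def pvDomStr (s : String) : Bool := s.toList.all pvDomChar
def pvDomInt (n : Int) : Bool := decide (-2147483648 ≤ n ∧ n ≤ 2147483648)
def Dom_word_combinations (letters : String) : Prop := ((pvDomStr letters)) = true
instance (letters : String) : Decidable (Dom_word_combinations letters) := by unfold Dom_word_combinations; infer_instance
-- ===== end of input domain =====

-- B replaces the per-length itertools.combinations passes by a single right-to-left
-- DP over the sorted characters that maintains all combinations grouped by length
-- (objective: alternative algorithm, same output order).

-- ===== PORT A =====
-- itertools.combinations(xs, n) in its documented lexicographic index order
-- (exact: emits index subsets in increasing lexicographic order, as itertools does).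
def combosA : Nat → List Char → List (List Char)
  | 0, _ => [[]]
  | _ + 1, [] => []
  | n + 1, c :: cs => ((combosA n cs).map (fun t => c :: t)) ++ combosA (n + 1) cs

def word_combinations (letters : String) : List String :=
  let sorted_word := PySem.List.sorted letters.toList (fun c => c) false
  (PySem.List.pyRange (sorted_word.length : Int) 0 (-1)).foldl
    (fun comblist i =>
      comblist ++ (combosA i.toNat sorted_word).map (fun l => String.mk l)) []

-- ===== PORT B =====
def shiftB (ch : Char) : List (List (List Char)) → List (List (List Char))
  | [] => []  -- unreachable: _shift is only called on a nonempty bucket list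
  | [b] => [b.map (fun s => ch :: s)]
  | b :: b' :: rest => (b.map (fun s => ch :: s) ++ b') :: shiftB ch (b' :: rest)

def word_combinations_alt (letters : String) : List String :=
  let sorted_word := PySem.List.sorted letters.toList (fun c => c) false
  let buckets := sorted_word.reverse.foldl (fun bs ch => [[]] :: shiftB ch bs) [[[]]]
  ((buckets.drop 1).reverse).foldl
    (fun out bucket => out ++ bucket.map (fun s => String.mk s)) []

-- ===== PRECONDITION & SPEC =====
def Spec_word_combinations (letters : String) (out : List String) : Prop := out = word_combinations_alt letters
instance (letters : String) (out : List String) : Decidable (Spec_word_combinations letters out) := by unfold Spec_word_combinations; infer_instance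

-- ===== CLAIM (what is proved, stated in full; the proofs are below) =====
def Claim_equal_word_combinations : Prop := ∀ (letters : String), Dom_word_combinations letters → Spec_word_combinations letters (word_combinations letters)

-- ===== LEMMAS AND PROOFS =====

theorem combosA_eq_nil : ∀ (l : List Char) (n : Nat), l.length < n → combosA n l = [] := by
  intro l
  induction l with
  | nil => intro n h; match n, h with | n + 1, _ => rfl
  | cons c cs ih =>
    intro n h
    match n, h with
    | n + 1, h =>
      simp only [combosA, List.append_eq_nil_iff, List.map_eq_nil_iff]
      constructor
      · exact ih n (by simpa using Nat.lt_of_succ_lt_succ h)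
      · exact ih (n + 1) (by simpa using Nat.lt_of_succ_lt h)

theorem shiftB_range (c : Char) (l : List Char) :
    ∀ (n i : Nat), i + n = l.length →
      shiftB c ((List.range' i (n + 1)).map (fun k => combosA k l)) =
        (List.range' i (n + 1)).map (fun k => combosA (k + 1) (c :: l)) := by
  intro n
  induction n with
  | zero =>
    intro i h
    have h1 : List.range' i (0 + 1) = [i] := by simp
    rw [h1]
    simp only [List.map_cons, List.map_nil, shiftB]
    simp [combosA, combosA_eq_nil l (i + 1) (by omega)]
  | succ n ih =>
    intro i h
    have h1 : List.range' i (n + 1 + 1) = i :: List.range' (i + 1) (n + 1) := by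
      rw [List.range'_succ]
    have h2 : List.range' (i + 1) (n + 1) = (i + 1) :: List.range' (i + 2) n := by
      rw [List.range'_succ]
    rw [h1, List.map_cons, List.map_cons]
    have hne : (List.range' (i + 1) (n + 1)).map (fun k => combosA k l) =
        combosA (i + 1) l :: (List.range' (i + 2) n).map (fun k => combosA k l) := by
      rw [h2]; simp
    rw [hne, shiftB, ← hne, ih (i + 1) (by omega)]
    simp [combosA]

theorem buckets_eq (l : List Char) :
    l.foldr (fun ch bs => [[]] :: shiftB ch bs) [[[]]] =
      (List.range (l.length + 1)).map (fun k => combosA k l) := by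
  induction l with
  | nil => simp [combosA, List.range_succ]
  | cons c cs ih =>
    simp only [List.foldr_cons, ih, List.length_cons]
    rw [List.range_eq_range', List.range_eq_range']
    have h1 : List.range' 0 (cs.length + 1 + 1) = 0 :: List.range' 1 (cs.length + 1) := by
      rw [List.range'_succ]
    rw [h1, List.map_cons]
    have h2 : List.range' 1 (cs.length + 1) = (List.range' 0 (cs.length + 1)).map (fun k => k + 1) := by
      rw [List.range'_eq_map_range, List.range'_eq_map_range, List.map_map]
      simp [Function.comp, Nat.add_comm]
    congr 1
    rw [h2, List.map_map, Function.comp_def]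
    have := shiftB_range c cs cs.length 0 (by omega)
    simpa using this

-- ===== VERDICT (by name: the statement is the Claim_ definition above) =====
theorem word_combinations_spec : Claim_equal_word_combinations := by
  intro letters _
  unfold Spec_word_combinations word_combinations word_combinations_alt
  dsimp only
  set sw := PySem.List.sorted letters.toList (fun c => c) false with hsw
  have hbuckets : sw.reverse.foldl (fun bs ch => [[]] :: shiftB ch bs) [[[]]] =
      (List.range (sw.length + 1)).map (fun k => combosA k sw) := by
    rw [List.foldl_reverse]; exact buckets_eq sw
  rw [hbuckets]
  have hdrop : ((List.range (sw.length + 1)).map (fun k => combosA k sw)).drop 1 =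
      (List.range' 1 sw.length).map (fun k => combosA k sw) := by
    rw [List.range_eq_range', List.range'_succ]
    simp
  rw [hdrop]
  rw [PySem.List.foldl_append_eq_flatMap, PySem.List.foldl_append_eq_flatMap,
      List.nil_append, List.nil_append]
  have hpr : PySem.List.pyRange ((0 : Int) + 1) ((sw.length : Int) + 1) 1 =
      (List.range' 1 sw.length).map Int.ofNat := by
    rw [PySem.List.pyRange_one, List.range'_eq_map_range, List.map_map]
    have h3 : ((sw.length : Int) + 1 - (0 + 1)).toNat = sw.length := by omega
    rw [h3]
    apply List.map_congr_left
    intro k _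
    simp [Function.comp]
  rw [PySem.List.pyRange_neg_one_eq_reverse, hpr, ← List.map_reverse, ← List.map_reverse,
      List.flatMap_map, List.flatMap_map]
  apply List.flatMap_congr
  intro k _
  simp
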